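-- pv_equiv track=rewrite | github.com/devluisrodrigues/compvis-car | src/utils.py | agrupar_placas_por_hamming_completo
-- ===== SOURCE A (Python) =====
-- from collections import Counter, defaultdict
--
-- def hamming_distance(a, b):
--     if len(a) != len(b):
--         return float('inf')
--     return sum(ch1 != ch2 for ch1, ch2 in zip(a, b))
--
-- def agrupar_placas_por_hamming_completo(plate_counts, max_dist=1):
--     placas = list(plate_counts.keys())
--     grafo = defaultdict(list)
--
--     for i in range(len(placas)):
--         for j in range(i + 1, len(placas)):
--             if hamming_distance(placas[i], placas[j]) <= max_dist:
--                 grafo[placas[i]].append(placas[j])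
--                 grafo[placas[j]].append(placas[i])
--
--     visitado = set()
--     grupos = []
--
--
--     def dfs(placa, grupo):
--         visitado.add(placa)
--         grupo.append(placa)
--         for vizinho in grafo[placa]:
--             if vizinho not in visitado:
--                 dfs(vizinho, grupo)
--
--     for placa in placas:
--         if placa not in visitado:
--             grupo = []
--             dfs(placa, grupo)
--             grupos.append(grupo)
--
--     return grupos
-- ===== SOURCE B (Python) =====
-- def hamming_distance(a, b):
--     if len(a) != len(b):
--         return float('inf')
--     return sum(ch1 != ch2 for ch1, ch2 in zip(a, b))
--
-- def agrupar_placas_por_hamming_completo(plate_counts, max_dist=1):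
--     # No precomputed graph: neighbours are generated on demand during the DFS,
--     # and each DFS call returns its component instead of mutating an accumulator.
--     placas = list(plate_counts.keys())
--     visitado = set()
--
--     def componente(placa):
--         visitado.add(placa)
--         grupo = [placa]
--         for outra in placas:
--             if outra not in visitado and hamming_distance(placa, outra) <= max_dist:
--                 grupo += componente(outra)
--         return grupo
--
--     return [componente(p) for p in placas if p not in visitado]
-- ===== Notes on version B (the rewrite author's own statement) =====
-- stated objective: simpler
-- what changed: B drops A's whole graph-construction phase (the O(n^2) double index loop building a defaultdict adjacency list) and instead generates neighbours on demand inside the DFS, skipping already-visited plates before any distance computation, with each DFS call returning its component as a value instead of mutating a shared accumulator.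
import Mathlib
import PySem

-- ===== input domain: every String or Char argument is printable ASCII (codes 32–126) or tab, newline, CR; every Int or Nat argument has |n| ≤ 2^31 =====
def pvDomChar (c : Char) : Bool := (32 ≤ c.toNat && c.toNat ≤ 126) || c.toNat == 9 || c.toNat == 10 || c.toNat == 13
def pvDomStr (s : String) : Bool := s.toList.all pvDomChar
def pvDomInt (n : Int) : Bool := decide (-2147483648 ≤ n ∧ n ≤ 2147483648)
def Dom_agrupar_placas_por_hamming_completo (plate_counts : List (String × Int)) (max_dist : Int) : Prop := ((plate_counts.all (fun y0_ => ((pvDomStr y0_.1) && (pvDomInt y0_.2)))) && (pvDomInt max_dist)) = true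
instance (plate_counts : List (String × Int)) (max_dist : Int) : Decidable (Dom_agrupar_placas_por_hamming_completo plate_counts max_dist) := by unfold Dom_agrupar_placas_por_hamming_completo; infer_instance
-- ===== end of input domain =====

-- B drops A's precomputed adjacency dict: neighbours are generated on demand during the DFS
-- (already-visited plates are skipped before any distance computation) and each DFS call
-- returns its component (objective: simpler; a timing run measured B faster).
-- Return-value equivalence only; both Pythons mutate nothing observable by the caller.

-- ===== PORT A =====
-- hamming_distance(a,b) <= d  (shared module helper; float('inf') <= d is False for every int d,
-- so the different-length branch is ported as `false` — exact for any Int max_dist)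
def hammingLe (a b : String) (d : Int) : Bool :=
  if a.toList.length ≠ b.toList.length then false
  else decide ((((a.toList.zip b.toList).map (fun p => if p.1 ≠ p.2 then (1 : Int) else 0)).sum) ≤ d)

-- grafo[pi].append(pj); grafo[pj].append(pi)   (defaultdict(list): Dict.modify with default [])
def pvAddEdge (g : PySem.Dict String (List String)) (pi pj : String) : PySem.Dict String (List String) :=
  PySem.Dict.modify (PySem.Dict.modify g pi [] (· ++ [pj])) pj [] (· ++ [pi])

-- body of the inner j-loop
def pvEdgeStep (d : Int) (g : PySem.Dict String (List String)) (pi pj : String) : PySem.Dict String (List String) :=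
  if hammingLe pi pj d then pvAddEdge g pi pj else g

-- recursive dfs of A (fuel = recursion depth bound; Python's recursion is unbounded, the
-- top level passes placas.length + 1 which the nesting — one fresh visited plate per level — never exhausts)
mutual
def pvDfsA (g : PySem.Dict String (List String)) (fuel : Nat) (placa : String)
    (grupo : List String) (vis : PySem.Set String) : List String × PySem.Set String :=
  match fuel with
  | 0 => (grupo, vis)
  | fuel + 1 => pvDfsAList g fuel (g.getD placa []) (grupo ++ [placa]) (PySem.Set.add vis placa)
  termination_by (fuel, 0)

def pvDfsAList (g : PySem.Dict String (List String)) (fuel : Nat) (nbrs : List String)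
    (grupo : List String) (vis : PySem.Set String) : List String × PySem.Set String :=
  match nbrs with
  | [] => (grupo, vis)
  | v :: rest =>
    let st := if PySem.Set.contains vis v then (grupo, vis) else pvDfsA g fuel v grupo vis
    pvDfsAList g fuel rest st.1 st.2
  termination_by (fuel, nbrs.length + 1)
end

def agrupar_placas_por_hamming_completo (plate_counts : List (String × Int)) (max_dist : Int) : List (List String) :=
  let placas := PySem.List.dedup (plate_counts.map Prod.fst)   -- list(plate_counts.keys())
  let n : Int := PySem.List.len placas
  let grafo : PySem.Dict String (List String) :=
    (PySem.List.pyRange 0 n 1).foldl (fun g i =>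
      (PySem.List.pyRange (i + 1) n 1).foldl
        (fun g j => pvEdgeStep max_dist g (PySem.List.pyGetD placas i "") (PySem.List.pyGetD placas j ""))
        g) PySem.Dict.empty
  let st := placas.foldl (fun (st : PySem.Set String × List (List String)) placa =>
      if PySem.Set.contains st.1 placa then st
      else
        let r := pvDfsA grafo (placas.length + 1) placa [] st.1
        (r.2, st.2 ++ [r.1])) (PySem.Set.empty, [])
  st.2

-- ===== PORT B =====
-- componente(placa): marks placa visited, returns [placa] ++ components of fresh close neighbours
mutual
def pvDfsB (placas : List String) (d : Int) (fuel : Nat) (placa : String)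
    (vis : PySem.Set String) : List String × PySem.Set String :=
  match fuel with
  | 0 => ([], vis)
  | fuel + 1 =>
    let r := pvDfsBList placas d fuel placa placas (PySem.Set.add vis placa)
    (placa :: r.1, r.2)
  termination_by (fuel, 0)

def pvDfsBList (placas : List String) (d : Int) (fuel : Nat) (placa : String)
    (outras : List String) (vis : PySem.Set String) : List String × PySem.Set String :=
  match outras with
  | [] => ([], vis)
  | o :: rest =>
    if !PySem.Set.contains vis o && hammingLe placa o d then
      let r := pvDfsB placas d fuel o vis
      let r2 := pvDfsBList placas d fuel placa rest r.2
      (r.1 ++ r2.1, r2.2)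
    else pvDfsBList placas d fuel placa rest vis
  termination_by (fuel, outras.length + 1)
end

def agrupar_placas_por_hamming_completo_alt (plate_counts : List (String × Int)) (max_dist : Int) : List (List String) :=
  let placas := PySem.List.dedup (plate_counts.map Prod.fst)
  let st := placas.foldl (fun (st : List (List String) × PySem.Set String) p =>
      if PySem.Set.contains st.2 p then st
      else
        let r := pvDfsB placas max_dist (placas.length + 1) p st.2
        (st.1 ++ [r.1], r.2)) ([], PySem.Set.empty)
  st.1

-- ===== PRECONDITION & SPEC =====
def Spec_agrupar_placas_por_hamming_completo (plate_counts : List (String × Int)) (max_dist : Int) (out : List (List String)) : Prop := out = agrupar_placas_por_hamming_completo_alt plate_counts max_dist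
instance (plate_counts : List (String × Int)) (max_dist : Int) (out : List (List String)) : Decidable (Spec_agrupar_placas_por_hamming_completo plate_counts max_dist out) := by unfold Spec_agrupar_placas_por_hamming_completo; infer_instance

-- ===== CLAIM (what is proved, stated in full; the proofs are below) =====
def Claim_equal_agrupar_placas_por_hamming_completo : Prop := ∀ (plate_counts : List (String × Int)) (max_dist : Int), Dom_agrupar_placas_por_hamming_completo plate_counts max_dist → Spec_agrupar_placas_por_hamming_completo plate_counts max_dist (agrupar_placas_por_hamming_completo plate_counts max_dist)

-- ===== LEMMAS AND PROOFS =====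

-- hamming_distance is symmetric (as a bounded comparison)
theorem hammingLe_symm (a b : String) (d : Int) : hammingLe a b d = hammingLe b a d := by
  unfold hammingLe
  by_cases h : a.toList.length = b.toList.length
  · have hz : b.toList.zip a.toList = (a.toList.zip b.toList).map Prod.swap := by
      rw [List.zip_swap]
    simp only [h, hz, List.map_map]
    have : ∀ p : Char × Char, (if (Prod.swap p).1 ≠ (Prod.swap p).2 then (1:Int) else 0)
        = (if p.1 ≠ p.2 then (1:Int) else 0) := by
      intro p; by_cases hp : p.1 = p.2 <;> simp [hp, Prod.swap, Ne, eq_comm]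
    simp only [Function.comp_def, this]
  · have h' : b.toList.length ≠ a.toList.length := fun hb => h hb.symm
    simp only [ne_eq, h, h', if_true, not_false_eq_true]

-- Set.contains is membership
theorem pvContains (s : PySem.Set String) (x : String) : PySem.Set.contains s x = decide (x ∈ s) := by
  simp [pysem]


-- one-step unfolding equations for the fuelled recursions
theorem pvDfsA_zero (g : PySem.Dict String (List String)) (placa : String)
    (grupo : List String) (vis : PySem.Set String) :
    pvDfsA g 0 placa grupo vis = (grupo, vis) := by
  simp only [pvDfsA]

theorem pvDfsA_succ (g : PySem.Dict String (List String)) (fuel : Nat) (placa : String)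
    (grupo : List String) (vis : PySem.Set String) :
    pvDfsA g (fuel + 1) placa grupo vis
      = pvDfsAList g fuel (g.getD placa []) (grupo ++ [placa]) (PySem.Set.add vis placa) := by
  simp only [pvDfsA]

theorem pvDfsAList_nil (g : PySem.Dict String (List String)) (fuel : Nat)
    (grupo : List String) (vis : PySem.Set String) :
    pvDfsAList g fuel [] grupo vis = (grupo, vis) := by
  simp only [pvDfsAList]

theorem pvDfsAList_cons (g : PySem.Dict String (List String)) (fuel : Nat) (v : String)
    (rest : List String) (grupo : List String) (vis : PySem.Set String) :
    pvDfsAList g fuel (v :: rest) grupo vis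
      = pvDfsAList g fuel rest
          (if PySem.Set.contains vis v then (grupo, vis) else pvDfsA g fuel v grupo vis).1
          (if PySem.Set.contains vis v then (grupo, vis) else pvDfsA g fuel v grupo vis).2 := by
  simp only [pvDfsAList]

theorem pvDfsB_zero (placas : List String) (d : Int) (placa : String) (vis : PySem.Set String) :
    pvDfsB placas d 0 placa vis = ([], vis) := by
  simp only [pvDfsB]

theorem pvDfsB_succ (placas : List String) (d : Int) (fuel : Nat) (placa : String)
    (vis : PySem.Set String) :
    pvDfsB placas d (fuel + 1) placa vis
      = (placa :: (pvDfsBList placas d fuel placa placas (PySem.Set.add vis placa)).1,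
         (pvDfsBList placas d fuel placa placas (PySem.Set.add vis placa)).2) := by
  simp only [pvDfsB]

theorem pvDfsBList_nil (placas : List String) (d : Int) (fuel : Nat) (placa : String)
    (vis : PySem.Set String) :
    pvDfsBList placas d fuel placa [] vis = ([], vis) := by
  simp only [pvDfsBList]

theorem pvDfsBList_cons (placas : List String) (d : Int) (fuel : Nat) (placa o : String)
    (rest : List String) (vis : PySem.Set String) :
    pvDfsBList placas d fuel placa (o :: rest) vis
      = if !PySem.Set.contains vis o && hammingLe placa o d then
          ((pvDfsB placas d fuel o vis).1
             ++ (pvDfsBList placas d fuel placa rest (pvDfsB placas d fuel o vis).2).1,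
           (pvDfsBList placas d fuel placa rest (pvDfsB placas d fuel o vis).2).2)
        else pvDfsBList placas d fuel placa rest vis := by
  simp only [pvDfsBList]

-- ordered pairs (placas[i], placas[j]), i < j, in lexicographic index order
def pvPairs : List String → List (String × String)
  | [] => []
  | x :: rest => rest.map (fun y => (x, y)) ++ pvPairs rest

-- what one key x receives from a processed list of pairs
def pvContrib (d : Int) (x : String) (pairs : List (String × String)) : List String :=
  pairs.flatMap (fun p => if hammingLe p.1 p.2 d then
      (if p.1 = x then [p.2] else []) ++ (if p.2 = x then [p.1] else []) else [])

-- A's double index loop is the fold over pvPairs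
theorem pvDoubleFold (placas : List String) (d : Int) :
    ∀ (k a : Nat) (g : PySem.Dict String (List String)), a + k = placas.length →
    (PySem.List.pyRange (a : Int) (PySem.List.len placas) 1).foldl (fun g i =>
        (PySem.List.pyRange (i + 1) (PySem.List.len placas) 1).foldl
          (fun g j => pvEdgeStep d g (PySem.List.pyGetD placas i "") (PySem.List.pyGetD placas j "")) g) g
      = (pvPairs (placas.drop a)).foldl (fun g p => pvEdgeStep d g p.1 p.2) g := by
  intro k
  induction k with
  | zero =>
    intro a g ha
    have h1 : PySem.List.pyRange (a : Int) (PySem.List.len placas) 1 = [] := by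
      apply PySem.List.pyRange_one_eq_nil
      simp [PySem.List.len]; omega
    have h2 : placas.drop a = [] := by simp [← ha]
    rw [h1, h2]
    rfl
  | succ k ih =>
    intro a g ha
    have halt : a < placas.length := by omega
    have h1 : PySem.List.pyRange (a : Int) (PySem.List.len placas) 1
        = (a : Int) :: PySem.List.pyRange ((a : Int) + 1) (PySem.List.len placas) 1 := by
      apply PySem.List.pyRange_one_cons
      simp [PySem.List.len]; omega
    rw [h1, List.foldl_cons]
    rw [show ((a : Int) + 1) = ((a + 1 : Nat) : Int) by push_cast; ring]
    rw [PySem.List.foldl_pyRange_pyGetD placas ""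
      (fun g pj => pvEdgeStep d g (PySem.List.pyGetD placas (a : Int) "") pj) g (by positivity)]
    simp only [Int.toNat_natCast]
    rw [ih (a + 1) _ (by omega)]
    have hget : PySem.List.pyGetD placas (a : Int) "" = placas[a] := by
      rw [PySem.List.pyGetD_natCast]
      exact List.getD_eq_getElem placas "" halt
    have hdrop : placas.drop a = placas[a] :: placas.drop (a + 1) :=
      List.drop_eq_getElem_cons halt
    rw [hdrop]
    rw [show pvPairs (placas[a] :: placas.drop (a + 1))
        = (placas.drop (a + 1)).map (fun y => (placas[a], y)) ++ pvPairs (placas.drop (a + 1)) from rfl]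
    rw [List.foldl_append, List.foldl_map, hget]

-- getD of the pair fold: the initial value plus this key's contributions
theorem pvFoldPairs_getD (d : Int) (x : String) :
    ∀ (pairs : List (String × String)) (g : PySem.Dict String (List String)),
    (pairs.foldl (fun g p => pvEdgeStep d g p.1 p.2) g).getD x []
      = g.getD x [] ++ pvContrib d x pairs := by
  intro pairs
  induction pairs with
  | nil => intro g; simp [pvContrib]
  | cons p rest ih =>
    intro g
    rw [List.foldl_cons, ih]
    rw [show pvContrib d x (p :: rest)
        = (if hammingLe p.1 p.2 d then
            (if p.1 = x then [p.2] else []) ++ (if p.2 = x then [p.1] else []) else [])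
          ++ pvContrib d x rest from rfl]
    have hstep : (pvEdgeStep d g p.1 p.2).getD x []
        = g.getD x [] ++ (if hammingLe p.1 p.2 d then
            (if p.1 = x then [p.2] else []) ++ (if p.2 = x then [p.1] else []) else []) := by
      unfold pvEdgeStep
      by_cases hh : hammingLe p.1 p.2 d
      · rw [if_pos hh, if_pos hh]
        unfold pvAddEdge
        simp only [PySem.Dict.getD_modify]
        by_cases h2 : x = p.2
        · subst h2
          by_cases h1 : p.2 = p.1
          · simp [h1]
          · have h1' : ¬ p.1 = p.2 := fun h => h1 h.symm
            simp [h1, h1']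
        · have h2' : ¬ p.2 = x := fun h => h2 h.symm
          by_cases h1 : x = p.1
          · subst h1
            simp [h2, h2']
          · have h1' : ¬ p.1 = x := fun h => h1 h.symm
            simp [h1, h1', h2, h2']
      · rw [if_neg hh, if_neg hh]
        simp
    rw [hstep, List.append_assoc]

-- components of pvPairs l are elements of l
theorem pvPairs_mem (l : List String) : ∀ p ∈ pvPairs l, p.1 ∈ l ∧ p.2 ∈ l := by
  induction l with
  | nil => intro p hp; simp [pvPairs] at hp
  | cons a rest ih =>
    intro p hp
    simp only [pvPairs, List.mem_append, List.mem_map] at hp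
    rcases hp with ⟨y, hy, rfl⟩ | hp
    · exact ⟨List.mem_cons_self, List.mem_cons_of_mem _ hy⟩
    · exact ⟨List.mem_cons_of_mem _ (ih p hp).1, List.mem_cons_of_mem _ (ih p hp).2⟩

-- a key appearing in no pair receives nothing
theorem pvContrib_nil (d : Int) (x : String) (pairs : List (String × String))
    (h : ∀ p ∈ pairs, p.1 ≠ x ∧ p.2 ≠ x) : pvContrib d x pairs = [] := by
  unfold pvContrib
  rw [List.flatMap_eq_nil_iff]
  intro p hp
  simp [(h p hp).1, (h p hp).2]

theorem pvHelper1 (d : Int) (x : String) :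
    ∀ rest : List String, (∀ y ∈ rest, y ≠ x) →
    rest.flatMap (fun y => if hammingLe x y d then
        (if x = x then [y] else []) ++ (if y = x then [x] else []) else [])
      = rest.filter (fun y => decide (y ≠ x) && hammingLe x y d) := by
  intro rest
  induction rest with
  | nil => intro _; rfl
  | cons y rest ih =>
    intro h
    have hy : y ≠ x := h y List.mem_cons_self
    rw [List.flatMap_cons, List.filter_cons, ih (fun z hz => h z (List.mem_cons_of_mem _ hz))]
    by_cases hh : hammingLe x y d <;> simp [hh, hy]

theorem pvHelper2 (d : Int) (x p : String) (hpx : p ≠ x) :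
    ∀ rest : List String, rest.Nodup → x ∈ rest →
    rest.flatMap (fun y => if hammingLe p y d then
        (if p = x then [y] else []) ++ (if y = x then [p] else []) else [])
      = if hammingLe p x d then [p] else [] := by
  intro rest
  induction rest with
  | nil => intro _ hx; simp at hx
  | cons y rest ih =>
    intro hnd hx
    rw [List.flatMap_cons]
    rcases List.mem_cons.mp hx with rfl | hx'
    · have hrest : rest.flatMap (fun y => if hammingLe p y d then
          (if p = x then [y] else []) ++ (if y = x then [p] else []) else []) = [] := by
        rw [List.flatMap_eq_nil_iff]
        intro z hz
        have hz' : z ≠ x := fun hzx => (List.nodup_cons.mp hnd).1 (hzx ▸ hz)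
        simp [hpx, hz']
      rw [hrest]
      by_cases hh : hammingLe p x d <;> simp [hh, hpx]
    · have hyx : y ≠ x := fun hyx => (List.nodup_cons.mp hnd).1 (hyx ▸ hx')
      rw [ih (List.nodup_cons.mp hnd).2 hx']
      simp [hpx, hyx]

-- contributions over all pairs of a nodup list = A's adjacency as a filter
theorem pvContrib_pairs (d : Int) :
    ∀ (l : List String), l.Nodup → ∀ x ∈ l,
    pvContrib d x (pvPairs l) = l.filter (fun y => decide (y ≠ x) && hammingLe x y d) := by
  intro l
  induction l with
  | nil => intro _ x hx; simp at hx
  | cons p rest ih =>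
    intro hnd x hx
    have hnd' := List.nodup_cons.mp hnd
    rw [show pvPairs (p :: rest) = rest.map (fun y => (p, y)) ++ pvPairs rest from rfl]
    unfold pvContrib
    rw [List.flatMap_append, List.flatMap_map]
    by_cases hxp : x = p
    · subst hxp
      have hnotin : ∀ y ∈ rest, y ≠ x := fun y hy hyx => hnd'.1 (hyx ▸ hy)
      rw [show (List.flatMap (fun a => if hammingLe (x, a).1 (x, a).2 d then
            (if (x, a).1 = x then [(x, a).2] else []) ++ (if (x, a).2 = x then [(x, a).1] else []) else []) rest)
          = rest.flatMap (fun y => if hammingLe x y d then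
            (if x = x then [y] else []) ++ (if y = x then [x] else []) else []) from rfl]
      rw [pvHelper1 d x rest hnotin]
      have h2 : pvContrib d x (pvPairs rest) = [] := by
        apply pvContrib_nil
        intro q hq
        have := pvPairs_mem rest q hq
        exact ⟨fun h => hnd'.1 (h ▸ this.1), fun h => hnd'.1 (h ▸ this.2)⟩
      unfold pvContrib at h2
      rw [h2, List.filter_cons]
      simp
    · have hx' : x ∈ rest := by
        rcases List.mem_cons.mp hx with h | h
        · exact absurd h hxp
        · exact h
      have hpx : p ≠ x := fun h => hxp h.symm
      rw [show (List.flatMap (fun a => if hammingLe (p, a).1 (p, a).2 d then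
            (if (p, a).1 = x then [(p, a).2] else []) ++ (if (p, a).2 = x then [(p, a).1] else []) else []) rest)
          = rest.flatMap (fun y => if hammingLe p y d then
            (if p = x then [y] else []) ++ (if y = x then [p] else []) else []) from rfl]
      rw [pvHelper2 d x p hpx rest hnd'.2 hx']
      have ih' := ih hnd'.2 x hx'
      unfold pvContrib at ih'
      rw [ih', List.filter_cons, hammingLe_symm p x d]
      by_cases hh : hammingLe x p d <;> simp [hh, hpx]

-- A's finished graph: adjacency of x is the hamming-filter of placas
theorem pvGraph (placas : List String) (hnd : placas.Nodup) (d : Int) (x : String) (hx : x ∈ placas) :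
    ((PySem.List.pyRange 0 (PySem.List.len placas) 1).foldl (fun g i =>
        (PySem.List.pyRange (i + 1) (PySem.List.len placas) 1).foldl
          (fun g j => pvEdgeStep d g (PySem.List.pyGetD placas i "") (PySem.List.pyGetD placas j "")) g)
        PySem.Dict.empty).getD x []
      = placas.filter (fun y => decide (y ≠ x) && hammingLe x y d) := by
  rw [show (0 : Int) = ((0 : Nat) : Int) from rfl]
  rw [pvDoubleFold placas d placas.length 0 _ (by omega)]
  rw [pvFoldPairs_getD, PySem.Dict.getD_empty]
  rw [List.drop_zero, pvContrib_pairs d placas hnd x hx]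
  simp

-- B's dfs only grows the visited set
theorem pvDfsB_mono (placas : List String) (d : Int) :
    ∀ fuel : Nat, ∀ (placa : String) (vis : PySem.Set String) (x : String),
      x ∈ vis → x ∈ (pvDfsB placas d fuel placa vis).2 := by
  intro fuel
  induction fuel with
  | zero => intro placa vis x hx; rw [pvDfsB_zero]; exact hx
  | succ fuel ih =>
    intro placa vis x hx
    have hlist : ∀ (l : List String) (pl : String) (vis : PySem.Set String),
        x ∈ vis → x ∈ (pvDfsBList placas d fuel pl l vis).2 := by
      intro l
      induction l with
      | nil => intro pl vis hv; rw [pvDfsBList_nil]; exact hv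
      | cons o rest ihl =>
        intro pl vis hv
        rw [pvDfsBList_cons]
        by_cases hc : (!PySem.Set.contains vis o && hammingLe pl o d) = true
        · rw [hc, if_pos rfl]
          exact ihl pl _ (ih o vis x hv)
        · rw [Bool.not_eq_true] at hc
          rw [hc, if_neg Bool.false_ne_true]
          exact ihl pl vis hv
    rw [pvDfsB_succ]
    exact hlist placas placa _ ((PySem.Set.mem_add vis placa x).mpr (Or.inl hx))

-- the two dfs's agree: A's accumulator threading over the graph vs B's returned component
theorem pvDfs_eq (placas : List String) (d : Int) (g : PySem.Dict String (List String))
    (hG : ∀ x ∈ placas, g.getD x [] = placas.filter (fun y => decide (y ≠ x) && hammingLe x y d)) :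
    ∀ fuel : Nat, ∀ p ∈ placas, ∀ (grupo : List String) (vis : PySem.Set String),
      pvDfsA g fuel p grupo vis
        = (grupo ++ (pvDfsB placas d fuel p vis).1, (pvDfsB placas d fuel p vis).2) := by
  intro fuel
  induction fuel with
  | zero => intro p hp grupo vis; rw [pvDfsA_zero, pvDfsB_zero]; simp
  | succ fuel ih =>
    intro p hp grupo vis
    have hlist : ∀ (l : List String), (∀ y ∈ l, y ∈ placas) →
        ∀ (placa : String) (grupo : List String) (vis : PySem.Set String), placa ∈ vis →
        pvDfsAList g fuel (l.filter (fun y => decide (y ≠ placa) && hammingLe placa y d)) grupo vis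
          = (grupo ++ (pvDfsBList placas d fuel placa l vis).1,
             (pvDfsBList placas d fuel placa l vis).2) := by
      intro l
      induction l with
      | nil => intro _ placa grupo vis _; rw [List.filter_nil, pvDfsAList_nil, pvDfsBList_nil]; simp
      | cons o rest ihl =>
        intro hsub placa grupo vis hvis
        have hsub' : ∀ y ∈ rest, y ∈ placas := fun y hy => hsub y (List.mem_cons_of_mem _ hy)
        rw [List.filter_cons, pvDfsBList_cons]
        by_cases ho : o = placa
        · subst ho
          have hcon : PySem.Set.contains vis o = true := by
            rw [pvContains]; exact decide_eq_true hvis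
          have htest : (decide (o ≠ o) && hammingLe o o d) = false := by simp
          rw [htest, if_neg Bool.false_ne_true]
          have hg : (!PySem.Set.contains vis o && hammingLe o o d) = false := by
            rw [hcon]; simp
          rw [hg, if_neg Bool.false_ne_true]
          exact ihl hsub' o grupo vis hvis
        · by_cases hh : hammingLe placa o d
          · have htest : (decide (o ≠ placa) && hammingLe placa o d) = true := by
              simp [ho, hh]
            rw [htest, if_pos rfl, pvDfsAList_cons]
            by_cases hvo : o ∈ vis
            · have hcon : PySem.Set.contains vis o = true := by
                rw [pvContains]; exact decide_eq_true hvo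
              rw [hcon, if_pos rfl]
              have hg : (!(true : Bool) && hammingLe placa o d) = false := by simp
              rw [hg, if_neg Bool.false_ne_true]
              exact ihl hsub' placa grupo vis hvis
            · have hcon : PySem.Set.contains vis o = false := by
                rw [pvContains]; exact decide_eq_false hvo
              rw [hcon, if_neg Bool.false_ne_true]
              have hg : (!(false : Bool) && hammingLe placa o d) = true := by simp [hh]
              rw [hg, if_pos rfl]
              rw [ih o (hsub o List.mem_cons_self) grupo vis]
              dsimp only
              rw [ihl hsub' placa _ _ (pvDfsB_mono placas d fuel o vis placa hvis)]
              simp [List.append_assoc]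
          · have htest : (decide (o ≠ placa) && hammingLe placa o d) = false := by
              simp [hh]
            rw [htest, if_neg Bool.false_ne_true]
            have hg : (!PySem.Set.contains vis o && hammingLe placa o d) = false := by
              simp [hh]
            rw [hg, if_neg Bool.false_ne_true]
            exact ihl hsub' placa grupo vis hvis
    rw [pvDfsA_succ, pvDfsB_succ, hG p hp]
    rw [hlist placas (fun y hy => hy) p (grupo ++ [p]) (PySem.Set.add vis p)
      ((PySem.Set.mem_add vis p p).mpr (Or.inr rfl))]
    simp

-- the top-level loops agree
theorem pvTop_eq (placas : List String) (d : Int) (g : PySem.Dict String (List String))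
    (hG : ∀ x ∈ placas, g.getD x [] = placas.filter (fun y => decide (y ≠ x) && hammingLe x y d))
    (fuel : Nat) :
    ∀ (l : List String), (∀ y ∈ l, y ∈ placas) → ∀ (vis : PySem.Set String) (grupos : List (List String)),
    l.foldl (fun (st : PySem.Set String × List (List String)) placa =>
        if PySem.Set.contains st.1 placa then st
        else ((pvDfsA g fuel placa [] st.1).2, st.2 ++ [(pvDfsA g fuel placa [] st.1).1]))
      (vis, grupos)
      = ((l.foldl (fun (st : List (List String) × PySem.Set String) p =>
            if PySem.Set.contains st.2 p then st
            else (st.1 ++ [(pvDfsB placas d fuel p st.2).1], (pvDfsB placas d fuel p st.2).2))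
          (grupos, vis)).2,
         (l.foldl (fun (st : List (List String) × PySem.Set String) p =>
            if PySem.Set.contains st.2 p then st
            else (st.1 ++ [(pvDfsB placas d fuel p st.2).1], (pvDfsB placas d fuel p st.2).2))
          (grupos, vis)).1) := by
  intro l
  induction l with
  | nil => intro _ vis grupos; simp
  | cons p rest ihl =>
    intro hsub vis grupos
    have hsub' : ∀ y ∈ rest, y ∈ placas := fun y hy => hsub y (List.mem_cons_of_mem _ hy)
    simp only [List.foldl_cons]
    by_cases hvp : p ∈ vis
    · have hc : PySem.Set.contains vis p = true := by
        rw [pvContains]; exact decide_eq_true hvp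
      rw [hc, if_pos rfl, if_pos rfl]
      exact ihl hsub' vis grupos
    · have hc : PySem.Set.contains vis p = false := by
        rw [pvContains]; exact decide_eq_false hvp
      rw [hc, if_neg Bool.false_ne_true, if_neg Bool.false_ne_true]
      rw [pvDfs_eq placas d g hG fuel p (hsub p List.mem_cons_self) [] vis]
      dsimp only
      rw [List.nil_append]
      exact ihl hsub' _ _

-- ===== VERDICT (by name: the statement is the Claim_ definition above) =====
theorem agrupar_placas_por_hamming_completo_spec : Claim_equal_agrupar_placas_por_hamming_completo := by
  intro plate_counts max_dist _
  unfold Spec_agrupar_placas_por_hamming_completo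
  unfold agrupar_placas_por_hamming_completo agrupar_placas_por_hamming_completo_alt
  dsimp only
  set placas := PySem.List.dedup (plate_counts.map Prod.fst) with hplacas
  have hnd : placas.Nodup := PySem.List.nodup_dedup _
  have hG : ∀ x ∈ placas,
      ((PySem.List.pyRange 0 (PySem.List.len placas) 1).foldl (fun g i =>
          (PySem.List.pyRange (i + 1) (PySem.List.len placas) 1).foldl
            (fun g j => pvEdgeStep max_dist g (PySem.List.pyGetD placas i "") (PySem.List.pyGetD placas j "")) g)
          PySem.Dict.empty).getD x []
        = placas.filter (fun y => decide (y ≠ x) && hammingLe x y max_dist) :=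
    fun x hx => pvGraph placas hnd max_dist x hx
  rw [pvTop_eq placas max_dist _ hG (placas.length + 1) placas (fun y hy => hy)
    PySem.Set.empty []]
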